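-- pv_equiv track=rewrite | github.com/buchanankerswell/kerswell_et_al_rocmlm | python/functions.py | encode_phases
-- ===== SOURCE A (Python) =====
-- def encode_phases(phases):
--     """
--     Encode unique phase assemblages and their corresponding numbers.
--
--     Args:
--         phases (list): List of phase assemblages represented as lists of phases.
--
--     Returns:
--         tuple: A tuple containing two elements:
--             - encoded_assemblages (list): List of encoded phase assemblages.
--             - unique_assemblages (dict): Dictionary mapping unique phase assemblages
--             to their encoded numbers.
--     """
--     unique_assemblages = {}
--     encoded_assemblages = []
--
--     # Encoding unique phase assemblages
--     for phase_assemblage in phases: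
--         assemblage_tuple = tuple(sorted(phase_assemblage))
--         if assemblage_tuple not in unique_assemblages:
--             unique_assemblages[assemblage_tuple] = len(unique_assemblages) + 1
--
--     # Encoding phase assemblage numbers
--     for phase_assemblage in phases:
--         encoded_assemblage = unique_assemblages[tuple(sorted(phase_assemblage))]
--         encoded_assemblages.append(encoded_assemblage)
--
--     return encoded_assemblages, unique_assemblages
-- ===== SOURCE B (Python) =====
-- def encode_phases(phases):
--     # Single pass: build the code dictionary and the encoded list together.
--     unique_assemblages = {}
--     encoded_assemblages = []
--     for phase_assemblage in phases:
--         t = tuple(sorted(phase_assemblage))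
--         code = unique_assemblages.get(t)
--         if code is None:
--             code = len(unique_assemblages) + 1
--             unique_assemblages[t] = code
--         encoded_assemblages.append(code)
--     return encoded_assemblages, unique_assemblages
-- ===== Notes on version B (the rewrite author's own statement) =====
-- stated objective: simpler
-- what changed: B makes a single pass that assigns each assemblage its code (len(dict)+1 on first sight) and emits it immediately, instead of A's two sequential passes that each re-sort every assemblage; every assemblage is sorted once instead of twice.
import Mathlib
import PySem

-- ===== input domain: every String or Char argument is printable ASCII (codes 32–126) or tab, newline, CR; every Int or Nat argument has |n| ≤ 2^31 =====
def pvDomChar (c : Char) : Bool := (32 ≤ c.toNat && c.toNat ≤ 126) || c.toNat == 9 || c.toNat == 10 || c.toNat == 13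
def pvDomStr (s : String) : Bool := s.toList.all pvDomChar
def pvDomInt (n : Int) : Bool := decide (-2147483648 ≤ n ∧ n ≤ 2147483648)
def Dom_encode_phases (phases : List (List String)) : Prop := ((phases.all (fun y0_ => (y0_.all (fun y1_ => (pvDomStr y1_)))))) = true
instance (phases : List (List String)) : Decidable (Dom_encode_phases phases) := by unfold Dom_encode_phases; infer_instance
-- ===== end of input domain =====

-- B differs from A by one single pass (each assemblage sorted once, code emitted as assigned)
-- instead of A's two passes; same return value.

-- ===== PORT A =====
-- Two passes, as in the Python: first build the dict of unique sorted assemblages,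
-- then look each sorted assemblage up again.  The lookup in pass 2 can never miss
-- (the key was inserted in pass 1), so Python's KeyError is unreachable; getD 0 is exact here.
def encode_phases (phases : List (List String)) : List Int × (List (List String × Int)) :=
  let unique_assemblages : PySem.Dict (List String) Int :=
    phases.foldl (fun d phase_assemblage =>
      let assemblage_tuple := PySem.List.sorted phase_assemblage (fun x => x) false
      if d.contains assemblage_tuple then d
      else d.insert assemblage_tuple ((d.size : Int) + 1)) PySem.Dict.empty
  let encoded_assemblages : List Int :=
    phases.foldl (fun acc phase_assemblage =>
      acc ++ [unique_assemblages.getD (PySem.List.sorted phase_assemblage (fun x => x) false) 0]) []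
  (encoded_assemblages, unique_assemblages.items)

-- ===== PORT B =====
-- One pass carrying (encoded list, dict): sort once, assign len(dict)+1 on first sight,
-- append the code immediately.
def encode_phases_alt (phases : List (List String)) : List Int × (List (List String × Int)) :=
  let st : List Int × PySem.Dict (List String) Int :=
    phases.foldl (fun st phase_assemblage =>
      let t := PySem.List.sorted phase_assemblage (fun x => x) false
      match st.2.get? t with
      | some code => (st.1 ++ [code], st.2)
      | none =>
        let code : Int := (st.2.size : Int) + 1
        (st.1 ++ [code], st.2.insert t code)) ([], PySem.Dict.empty)
  (st.1, st.2.items)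

-- ===== PRECONDITION & SPEC =====
def Spec_encode_phases (phases : List (List String)) (out : List Int × (List (List String × Int))) : Prop := out = encode_phases_alt phases
instance (phases : List (List String)) (out : List Int × (List (List String × Int))) : Decidable (Spec_encode_phases phases out) := by unfold Spec_encode_phases; infer_instance

-- ===== CLAIM (what is proved, stated in full; the proofs are below) =====
def Claim_equal_encode_phases : Prop := ∀ (phases : List (List String)), Dom_encode_phases phases → Spec_encode_phases phases (encode_phases phases)

-- ===== LEMMAS AND PROOFS =====

-- A's dict-building step (one iteration of pass 1), named for the proofs.
def pvStep (d : PySem.Dict (List String) Int) (p : List String) : PySem.Dict (List String) Int :=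
  if d.contains (PySem.List.sorted p (fun x => x) false) then d
  else d.insert (PySem.List.sorted p (fun x => x) false) ((d.size : Int) + 1)

-- Once a key has a value, further pvStep iterations never change it.
theorem pvStep_mono (l : List (List String)) (d : PySem.Dict (List String) Int)
    (k : List String) (h : (d.get? k).isSome) :
    (l.foldl pvStep d).get? k = d.get? k := by
  induction l generalizing d with
  | nil => rfl
  | cons p l ih =>
    simp only [List.foldl_cons]
    have hstep : (pvStep d p).get? k = d.get? k := by
      unfold pvStep
      split
      · rfl
      · next hc =>
        rw [PySem.Dict.get?_insert_of_ne]
        intro hk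
        subst hk
        rw [PySem.Dict.contains_eq_isSome_get?] at hc
        simp [h] at hc
    rw [ih (pvStep d p) (by rw [hstep]; exact h), hstep]

-- B's fold, started at any state, equals pass-1's dict plus the lookups in the FINAL dict.
theorem pvB_fold (l : List (List String)) (enc : List Int) (d : PySem.Dict (List String) Int) :
    l.foldl (fun st phase_assemblage =>
      let t := PySem.List.sorted phase_assemblage (fun x => x) false
      match st.2.get? t with
      | some code => (st.1 ++ [code], st.2)
      | none =>
        let code : Int := (st.2.size : Int) + 1
        (st.1 ++ [code], st.2.insert t code)) (enc, d)
    = (enc ++ l.map (fun p => (l.foldl pvStep d).getD (PySem.List.sorted p (fun x => x) false) 0),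
       l.foldl pvStep d) := by
  induction l generalizing enc d with
  | nil => simp
  | cons p l ih =>
    simp only [List.foldl_cons, List.map_cons]
    set t := PySem.List.sorted p (fun x => x) false with ht
    have hfinal : ∀ c : Int, (pvStep d p).get? t = some c →
        ((l.foldl pvStep (pvStep d p)).getD t 0 = c) := by
      intro c hc
      rw [PySem.Dict.getD_eq_get?_getD, pvStep_mono l _ t (by simp [hc]), hc]
      rfl
    cases hdt : d.get? t with
    | some c =>
      have hstep : pvStep d p = d := by
        unfold pvStep
        rw [← ht, PySem.Dict.contains_eq_isSome_get?, hdt]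
        simp
      have h2 := hfinal c (by rw [hstep]; exact hdt)
      rw [hstep] at h2
      simp only [← ht, hdt]
      rw [ih]
      simp only [List.foldl_cons, hstep]
      simp [h2]
    | none =>
      have hstep : pvStep d p = d.insert t ((d.size : Int) + 1) := by
        unfold pvStep
        rw [← ht, PySem.Dict.contains_eq_isSome_get?, hdt]
        simp
      have h2 := hfinal ((d.size : Int) + 1)
        (by rw [hstep]; exact PySem.Dict.get?_insert_self _ _ _)
      rw [hstep] at h2
      simp only [← ht, hdt]
      rw [ih]
      simp only [List.foldl_cons, hstep]
      simp [h2]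

-- A loop appending f p for each p is a map.
theorem pv_foldl_append {α β : Type} (l : List α) (acc : List β) (f : α → β) :
    l.foldl (fun a p => a ++ [f p]) acc = acc ++ l.map f := by
  induction l generalizing acc with
  | nil => simp
  | cons p l ih => simp [ih]

-- ===== VERDICT (by name: the statement is the Claim_ definition above) =====
theorem encode_phases_spec : Claim_equal_encode_phases := by
  intro phases _
  simp only [Spec_encode_phases, encode_phases, encode_phases_alt]
  rw [pvB_fold, pv_foldl_append]
  rfl
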